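-- pv_equiv track=rewrite | github.com/jinseok1306/Programmers | 코딩테스트 입문/Python/배열의 길이에 따라 다른 연산하기.py | solution
-- ===== SOURCE A (Python) =====
-- def solution(arr, n):
--     flag = True if len(arr)%2==0 else False
--     answer = []
--
--     # 짝수인 경우
--     if flag:
--         for index,value in enumerate(arr):
--             if index%2!=0:
--                 answer.append(value+n)
--             else:
--                 answer.append(value)
--
--     # 홀수인 경우
--     else:
--         for index,value in enumerate(arr):
--             if index%2==0:
--                 answer.append(value+n)
--             else:
--                 answer.append(value)
--
--     return answer
-- ===== SOURCE B (Python) =====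
-- def solution(arr, n):
--     answer = list(arr)
--     start = 1 if len(arr) % 2 == 0 else 0
--     for i in range(start, len(arr), 2):
--         answer[i] += n
--     return answer
-- ===== Notes on version B (the rewrite author's own statement) =====
-- stated objective: faster
-- what changed: Instead of branching on length parity and appending element by element while testing every index's parity, B copies the input once and walks only the affected indices with a stride-2 range, adding n in place.
import Mathlib
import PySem

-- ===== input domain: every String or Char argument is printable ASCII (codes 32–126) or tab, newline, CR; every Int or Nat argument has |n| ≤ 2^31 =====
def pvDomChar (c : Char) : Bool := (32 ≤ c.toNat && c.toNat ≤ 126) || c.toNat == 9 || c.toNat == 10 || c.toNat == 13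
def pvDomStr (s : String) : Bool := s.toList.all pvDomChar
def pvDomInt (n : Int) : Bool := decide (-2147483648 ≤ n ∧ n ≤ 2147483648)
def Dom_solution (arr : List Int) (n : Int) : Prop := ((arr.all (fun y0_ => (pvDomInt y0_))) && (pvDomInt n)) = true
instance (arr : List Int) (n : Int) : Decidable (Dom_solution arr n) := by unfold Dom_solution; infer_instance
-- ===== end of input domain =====

-- B replaces A's length-parity branch with two enumerate loops by a copy of the input
-- modified in place along a stride-2 index range over only the affected positions (objective: simpler).


-- ===== PORT A =====
def solution (arr : List Int) (n : Int) : List Int :=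
  let flag := if PySem.List.len arr % 2 = 0 then true else false
  if flag then
    (PySem.List.enumerate arr).foldl
      (fun answer p => if p.1 % 2 ≠ 0 then answer ++ [p.2 + n] else answer ++ [p.2]) []
  else
    (PySem.List.enumerate arr).foldl
      (fun answer p => if p.1 % 2 = 0 then answer ++ [p.2 + n] else answer ++ [p.2]) []

-- ===== PORT B =====
def solution_alt (arr : List Int) (n : Int) : List Int :=
  let answer := arr
  let start : Int := if PySem.List.len arr % 2 = 0 then 1 else 0
  (PySem.List.pyRange start (PySem.List.len arr) 2).foldl
    (fun ans i => PySem.List.pySetD ans i (PySem.List.pyGetD ans i 0 + n)) answer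

-- ===== PRECONDITION & SPEC =====
def Spec_solution (arr : List Int) (n : Int) (out : List Int) : Prop := out = solution_alt arr n
instance (arr : List Int) (n : Int) (out : List Int) : Decidable (Spec_solution arr n out) := by unfold Spec_solution; infer_instance

-- ===== CLAIM (what is proved, stated in full; the proofs are below) =====
def Claim_equal_solution : Prop := ∀ (arr : List Int) (n : Int), Dom_solution arr n → Spec_solution arr n (solution arr n)

-- ===== LEMMAS AND PROOFS =====

-- the append-with-branch loop body is an unconditional append of a branched element
theorem append_branch_eq {c : Int × Int → Prop} [DecidablePred c] (n : Int) :
    (fun (answer : List Int) (p : Int × Int) =>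
        if c p then answer ++ [p.2 + n] else answer ++ [p.2])
      = fun answer p => answer ++ [if c p then p.2 + n else p.2] := by
  funext answer p
  by_cases h : c p <;> simp [h]

-- the set-fold preserves length
theorem fold_set_length (n : Int) (idxs : List Int) (ans : List Int) :
    (idxs.foldl (fun ans i => PySem.List.pySetD ans i (PySem.List.pyGetD ans i 0 + n)) ans).length
      = ans.length := by
  induction idxs generalizing ans with
  | nil => rfl
  | cons i rest ih =>
      simp only [List.foldl_cons]
      rw [ih, PySem.List.length_pySetD]

-- elementwise effect of folding in-place additions over a duplicate-free list of valid indices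
theorem fold_set_get (n : Int) (idxs : List Int) :
    ∀ (ans : List Int), idxs.Nodup →
      (∀ i ∈ idxs, 0 ≤ i ∧ i < (ans.length : Int)) →
      ∀ (k : Nat), k < ans.length →
        PySem.List.pyGetD
          (idxs.foldl (fun ans i => PySem.List.pySetD ans i (PySem.List.pyGetD ans i 0 + n)) ans)
          (k : Int) 0
        = if ((k : Int) ∈ idxs) then PySem.List.pyGetD ans (k : Int) 0 + n
          else PySem.List.pyGetD ans (k : Int) 0 := by
  induction idxs with
  | nil => intro ans _ _ k hk; simp
  | cons i rest ih =>
      intro ans hnd hbound k hk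
      have hi := hbound i (List.mem_cons_self)
      have hm : ((i.toNat : Nat) : Int) = i := by omega
      have hiLt : i.toNat < ans.length := by omega
      have hnotr : i ∉ rest := (List.nodup_cons.mp hnd).1
      simp only [List.foldl_cons]
      have hbound' : ∀ j ∈ rest, 0 ≤ j ∧ j <
          ((PySem.List.pySetD ans i (PySem.List.pyGetD ans i 0 + n)).length : Int) := by
        intro j hj
        rw [PySem.List.length_pySetD]
        exact hbound j (List.mem_cons_of_mem _ hj)
      have hklt : k < (PySem.List.pySetD ans i (PySem.List.pyGetD ans i 0 + n)).length := by
        rw [PySem.List.length_pySetD]; exact hk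
      rw [ih _ (List.Nodup.of_cons hnd) hbound' k hklt]
      rw [← hm, PySem.List.pyGetD_pySetD_natCast ans i.toNat k _ 0 hiLt]
      by_cases hek : k = i.toNat
      · have hke : (k : Int) = ((i.toNat : Nat) : Int) := by exact_mod_cast hek
        have hr : (k : Int) ∉ rest := by rw [hke, hm]; exact hnotr
        rw [if_pos hek, ← hke, if_neg hr, if_pos (List.mem_cons_self)]
      · have hne : ((k : Int)) ≠ ((i.toNat : Nat) : Int) := by exact_mod_cast hek
        rw [if_neg hek]
        by_cases hr : (k : Int) ∈ rest
        · rw [if_pos hr, if_pos (List.mem_cons_of_mem _ hr)]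
        · rw [if_neg hr, if_neg (by rw [List.mem_cons]; push_neg; exact ⟨hne, hr⟩)]

theorem nodup_pyRange_two (a b : Int) : (PySem.List.pyRange a b 2).Nodup := by
  rw [PySem.List.pyRange_of_pos a b (by norm_num)]
  exact List.Nodup.map (fun x y h => by omega) (List.nodup_range)

theorem solution_len_int (arr : List Int) : PySem.List.len arr = (arr.length : Int) := by
  simp [PySem.List.len]

-- B's fold characterized at a valid index
theorem solution_alt_getElem (arr : List Int) (n start : Int) (h0 : 0 ≤ start) (k : Nat)
    (hk : k < ((PySem.List.pyRange start (arr.length : Int) 2).foldl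
        (fun ans i => PySem.List.pySetD ans i (PySem.List.pyGetD ans i 0 + n)) arr).length) :
    ((PySem.List.pyRange start (arr.length : Int) 2).foldl
        (fun ans i => PySem.List.pySetD ans i (PySem.List.pyGetD ans i 0 + n)) arr)[k]
      = if (start ≤ (k : Int) ∧ (k : Int) < (arr.length : Int) ∧ (2 : Int) ∣ (k : Int) - start)
        then arr.getD k 0 + n else arr.getD k 0 := by
  have hkL : k < arr.length := by rwa [fold_set_length] at hk
  have hbound : ∀ i ∈ PySem.List.pyRange start (arr.length : Int) 2,
      0 ≤ i ∧ i < (arr.length : Int) := by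
    intro i hi
    rw [PySem.List.mem_pyRange_iff_of_pos (by norm_num)] at hi
    exact ⟨by omega, hi.2.1⟩
  have hget : ((PySem.List.pyRange start (arr.length : Int) 2).foldl
        (fun ans i => PySem.List.pySetD ans i (PySem.List.pyGetD ans i 0 + n)) arr)[k]
      = PySem.List.pyGetD ((PySem.List.pyRange start (arr.length : Int) 2).foldl
        (fun ans i => PySem.List.pySetD ans i (PySem.List.pyGetD ans i 0 + n)) arr) (k : Int) 0 := by
    rw [PySem.List.pyGetD_natCast, List.getD_eq_getElem]
  rw [hget, fold_set_get n _ arr (nodup_pyRange_two _ _) hbound k hkL]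
  simp only [PySem.List.mem_pyRange_iff_of_pos (show (0:Int) < 2 by norm_num),
    PySem.List.pyGetD_natCast]

-- ===== VERDICT (by name: the statement is the Claim_ definition above) =====
theorem solution_spec : Claim_equal_solution := by
  intro arr n _
  unfold Spec_solution solution solution_alt
  simp only [solution_len_int]
  have hA2 : ∀ (c : Int × Int → Prop) [DecidablePred c],
      (PySem.List.enumerate arr).foldl
        (fun answer p => if c p then answer ++ [p.2 + n] else answer ++ [p.2]) []
      = (PySem.List.enumerate arr).map (fun p => if c p then p.2 + n else p.2) := by
    intro c _
    rw [append_branch_eq n, PySem.List.foldl_append_singleton_eq_map]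
    simp
  by_cases hpar : ((arr.length : Int)) % 2 = 0
  · simp only [if_pos hpar, if_true, hA2]
    apply List.ext_getElem
    · rw [List.length_map, PySem.List.length_enumerate, fold_set_length]
    · intro k hk1 hk2
      rw [solution_alt_getElem arr n 1 (by norm_num) k hk2,
          List.getElem_map, PySem.List.getElem_enumerate]
      simp only [zero_add]
      have hkL : k < arr.length := by simpa [PySem.List.length_enumerate] using hk1
      rw [List.getD_eq_getElem _ _ hkL]
      split_ifs with h1 h2 h2 <;> first | rfl | (exfalso; omega)
  · simp only [if_neg hpar, Bool.false_eq_true, if_false, hA2]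
    apply List.ext_getElem
    · rw [List.length_map, PySem.List.length_enumerate, fold_set_length]
    · intro k hk1 hk2
      rw [solution_alt_getElem arr n 0 (by norm_num) k hk2,
          List.getElem_map, PySem.List.getElem_enumerate]
      simp only [zero_add]
      have hkL : k < arr.length := by simpa [PySem.List.length_enumerate] using hk1
      rw [List.getD_eq_getElem _ _ hkL]
      split_ifs with h1 h2 h2 <;> first | rfl | (exfalso; omega)
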